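-- pv_equiv track=rewrite | github.com/aloaoa/sheetsync-back | main.py | map_row_to_contact
-- ===== SOURCE A (Python) =====
-- from typing import List, Optional, Dict, Any
--
-- HEADER_ALIASES = {
--     "email": {"email", "e-mail", "mail"},
--     "firstname": {"first name", "firstname", "first_name", "given name"},
--     "lastname": {"last name", "lastname", "last_name", "surname"},
--     "phone": {"phone", "phone number", "mobile", "mobile phone"},
--     "company": {"company", "account", "organisation", "organization"},
-- }
--
-- def _norm(s: str) -> str:
--     return "".join(ch for ch in str(s).strip().lower() if ch.isalnum())
--
-- def map_row_to_contact(headers: List[str],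
--                        values: List[Optional[str]],
--                        mapping: Optional[Dict[str, str]] = None) -> Dict[str, Any]:
--     vals = ["" if v is None else str(v) for v in values]
--     contact = {"email": "", "firstname": "", "lastname": "", "phone": "", "company": ""}
--
--     if mapping:  # explicit mapping from sidebar
--         lower_map = {k: _norm(v) for k, v in mapping.items() if k in contact}
--         hnorm = [_norm(h) for h in headers]
--         for prop, wanted in lower_map.items():
--             if wanted in hnorm:
--                 idx = hnorm.index(wanted)
--                 if idx < len(vals): contact[prop] = vals[idx]
--     else:
--         # heuristic aliases
--         hnorm = [_norm(h) for h in headers]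
--         for prop, aliases in HEADER_ALIASES.items():
--             for i, h in enumerate(hnorm):
--                 if h in {_norm(a) for a in aliases}:
--                     if i < len(vals): contact[prop] = vals[i]
--                     break
--
--     contact["email"] = contact["email"].strip().lower()
--     # drop empties so we don't blank HubSpot fields
--     return {k: v for k, v in contact.items() if v}
-- ===== SOURCE B (Python) =====
-- from typing import List, Optional, Dict, Any
--
-- HEADER_ALIASES = {
--     "email": {"email", "e-mail", "mail"},
--     "firstname": {"first name", "firstname", "first_name", "given name"},
--     "lastname": {"last name", "lastname", "last_name", "surname"},
--     "phone": {"phone", "phone number", "mobile", "mobile phone"},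
--     "company": {"company", "account", "organisation", "organization"},
-- }
--
-- def _norm(s: str) -> str:
--     return "".join(ch for ch in str(s).strip().lower() if ch.isalnum())
--
-- # reverse index: normalized alias -> contact property (aliases are disjoint across props)
-- _ALIAS_TO_PROP = {_norm(a): prop for prop, aliases in HEADER_ALIASES.items() for a in aliases}
--
-- def map_row_to_contact(headers: List[str],
--                        values: List[Optional[str]],
--                        mapping: Optional[Dict[str, str]] = None) -> Dict[str, Any]:
--     vals = ["" if v is None else str(v) for v in values]
--     contact = {"email": "", "firstname": "", "lastname": "", "phone": "", "company": ""}
--     hnorm = [_norm(h) for h in headers]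
--
--     if mapping:  # explicit mapping from sidebar
--         hidx = {}  # normalized header -> first index
--         for i, h in enumerate(hnorm):
--             hidx.setdefault(h, i)
--         for prop, v in mapping.items():
--             if prop in contact:
--                 idx = hidx.get(_norm(v))
--                 if idx is not None and idx < len(vals):
--                     contact[prop] = vals[idx]
--     else:
--         # single pass over headers with a reverse alias index
--         seen = set()
--         for i, h in enumerate(hnorm):
--             prop = _ALIAS_TO_PROP.get(h)
--             if prop is not None and prop not in seen:
--                 seen.add(prop)
--                 if i < len(vals):
--                     contact[prop] = vals[i]
--
--     contact["email"] = contact["email"].strip().lower()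
--     return {k: v for k, v in contact.items() if v}
-- ===== Notes on version B (the rewrite author's own statement) =====
-- stated objective: alternative
-- what changed: The heuristic branch's nested prop-by-prop scan over all headers is replaced by a precomputed reverse alias-to-property index and a single pass over the headers with a seen-set, and the mapping branch's repeated hnorm.index linear scans are replaced by a first-index dictionary built once with setdefault.
import Mathlib
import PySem

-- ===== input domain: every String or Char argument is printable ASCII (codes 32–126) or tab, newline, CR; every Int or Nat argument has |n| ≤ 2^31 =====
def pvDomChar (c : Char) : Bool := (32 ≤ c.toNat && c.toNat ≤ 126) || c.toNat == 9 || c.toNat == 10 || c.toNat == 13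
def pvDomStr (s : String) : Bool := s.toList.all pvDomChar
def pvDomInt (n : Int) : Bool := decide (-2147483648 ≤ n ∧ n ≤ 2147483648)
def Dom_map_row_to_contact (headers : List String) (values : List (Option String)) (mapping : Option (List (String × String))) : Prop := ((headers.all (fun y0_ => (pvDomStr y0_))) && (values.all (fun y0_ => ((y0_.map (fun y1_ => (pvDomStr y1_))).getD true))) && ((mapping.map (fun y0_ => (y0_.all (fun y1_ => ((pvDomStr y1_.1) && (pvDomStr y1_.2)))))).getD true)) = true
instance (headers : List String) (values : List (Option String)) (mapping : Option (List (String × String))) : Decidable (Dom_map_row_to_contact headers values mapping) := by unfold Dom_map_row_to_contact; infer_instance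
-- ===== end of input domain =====

-- B replaces A's nested prop×header alias scan by a precomputed reverse alias index and one header
-- pass with a seen-set, and A's repeated hnorm.index scans by a first-index dictionary (alternative).

-- ===== PORT A =====

-- _norm: strip, lower, keep alphanumeric characters
def pvNorm (s : String) : String :=
  String.mk ((PySem.Chars.lower (PySem.Chars.strip s.toList)).filter PySem.Chars.isalnum)

-- HEADER_ALIASES (module constant; the alias sets are only used through membership)
def pvHeaderAliases : List (String × List String) :=
  [("email", ["email", "e-mail", "mail"]),
   ("firstname", ["first name", "firstname", "first_name", "given name"]),
   ("lastname", ["last name", "lastname", "last_name", "surname"]),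
   ("phone", ["phone", "phone number", "mobile", "mobile phone"]),
   ("company", ["company", "account", "organisation", "organization"])]

-- contact = {"email": "", ...}
def pvContact0 : PySem.Dict String String :=
  PySem.Dict.ofList [("email", ""), ("firstname", ""), ("lastname", ""), ("phone", ""), ("company", "")]

-- shared tail: contact["email"] = contact["email"].strip().lower(); drop empty values
def pvFinish (c : PySem.Dict String String) : List (String × String) :=
  let c := c.insert "email" (PySem.Str.lower (PySem.Str.strip (c.getD "email" "")))
  c.items.filter (fun p => p.2 != "")

-- inner loop of A's heuristic branch: first header whose normalization is in the alias set, then break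
def pvScanA (vals : List String) (prop : String) (aliasesN : PySem.Set String)
    (c : PySem.Dict String String) : List (Int × String) → PySem.Dict String String
  | [] => c
  | (i, h) :: rest =>
    if h ∈ aliasesN then
      (if i < (vals.length : Int) then c.insert prop (PySem.List.pyGetD vals i "") else c)
    else pvScanA vals prop aliasesN c rest

-- A's heuristic branch: for prop, aliases in HEADER_ALIASES.items(): scan enumerate(hnorm)
def pvHeurA (vals : List String) (hnorm : List String) : PySem.Dict String String :=
  pvHeaderAliases.foldl
    (fun c pa => pvScanA vals pa.1 (PySem.Set.ofList (pa.2.map pvNorm)) c (PySem.List.enumerate hnorm 0))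
    pvContact0

def map_row_to_contact (headers : List String) (values : List (Option String)) (mapping : Option (List (String × String))) : List (String × String) :=
  let vals := values.map (fun v => v.getD "")
  let contact :=
    match mapping with
    | some m =>
      if m.isEmpty then pvHeurA vals (headers.map pvNorm)
      else
        let md := PySem.Dict.ofList m
        let lowerMap := md.items.foldl
          (fun d p => if pvContact0.contains p.1 then d.insert p.1 (pvNorm p.2) else d) PySem.Dict.empty
        let hnorm := headers.map pvNorm
        lowerMap.items.foldl
          (fun c pw =>
            match PySem.List.index? hnorm pw.2 with
            | some idx => if idx < vals.length then c.insert pw.1 (vals.getD idx "") else c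
            | none => c)
          pvContact0
    | none => pvHeurA vals (headers.map pvNorm)
  pvFinish contact

-- ===== PORT B =====

-- _ALIAS_TO_PROP: reverse index normalized alias -> property
def pvAliasToProp : PySem.Dict String String :=
  pvHeaderAliases.foldl (fun d pa => pa.2.foldl (fun d a => d.insert (pvNorm a) pa.1) d) PySem.Dict.empty

-- B's heuristic branch: one pass over enumerate(hnorm) with a seen set
def pvLoopB (vals : List String) : List (Int × String) → PySem.Set String → PySem.Dict String String → PySem.Dict String String
  | [], _, c => c
  | (i, h) :: rest, seen, c =>
    match pvAliasToProp.get? h with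
    | some prop =>
      if prop ∈ seen then pvLoopB vals rest seen c
      else pvLoopB vals rest (PySem.Set.add seen prop)
        (if i < (vals.length : Int) then c.insert prop (PySem.List.pyGetD vals i "") else c)
    | none => pvLoopB vals rest seen c

def map_row_to_contact_alt (headers : List String) (values : List (Option String)) (mapping : Option (List (String × String))) : List (String × String) :=
  let vals := values.map (fun v => v.getD "")
  let hnorm := headers.map pvNorm
  let contact :=
    match mapping with
    | some m =>
      if m.isEmpty then pvLoopB vals (PySem.List.enumerate hnorm 0) [] pvContact0
      else
        let md := PySem.Dict.ofList m
        let hidx := (PySem.List.enumerate hnorm 0).foldl (fun d p => d.setdefault p.2 p.1) PySem.Dict.empty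
        md.items.foldl
          (fun c kv =>
            if pvContact0.contains kv.1 then
              match hidx.get? (pvNorm kv.2) with
              | some idx => if idx < (vals.length : Int) then c.insert kv.1 (PySem.List.pyGetD vals idx "") else c
              | none => c
            else c)
          pvContact0
    | none => pvLoopB vals (PySem.List.enumerate hnorm 0) [] pvContact0
  pvFinish contact

-- ===== PRECONDITION & SPEC =====
def Spec_map_row_to_contact (headers : List String) (values : List (Option String)) (mapping : Option (List (String × String))) (out : List (String × String)) : Prop := out = map_row_to_contact_alt headers values mapping
instance (headers : List String) (values : List (Option String)) (mapping : Option (List (String × String))) (out : List (String × String)) : Decidable (Spec_map_row_to_contact headers values mapping out) := by unfold Spec_map_row_to_contact; infer_instance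

-- ===== CLAIM (what is proved, stated in full; the proofs are below) =====
def Claim_equal_map_row_to_contact : Prop := ∀ (headers : List String) (values : List (Option String)) (mapping : Option (List (String × String))), Dom_map_row_to_contact headers values mapping → Spec_map_row_to_contact headers values mapping (map_row_to_contact headers values mapping)

-- ===== LEMMAS AND PROOFS =====

-- find? only depends on the predicate's values on the list
theorem pv_find?_eqv {α : Type} (l : List α) (p q : α → Bool) (h : ∀ x ∈ l, p x = q x) :
    l.find? p = l.find? q := by
  induction l with
  | nil => rfl
  | cons x xs ih =>
    simp only [List.find?_cons]
    rw [h x (by simp)]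
    cases q x
    · exact ih (fun y hy => h y (by simp [hy]))
    · rfl

theorem pv_atp_items : pvAliasToProp.items =
    [("email", "email"), ("mail", "email"), ("firstname", "firstname"), ("givenname", "firstname"),
     ("lastname", "lastname"), ("surname", "lastname"), ("phone", "phone"), ("phonenumber", "phone"),
     ("mobile", "phone"), ("mobilephone", "phone"), ("company", "company"), ("account", "company"),
     ("organisation", "company"), ("organization", "company")] := by decide

-- lookup in the reverse index agrees with membership in each normalized alias set
theorem pv_alias_email (h : String) :
    (pvAliasToProp.get? h == some "email")
      = decide (h ∈ PySem.Set.ofList (["email", "e-mail", "mail"].map pvNorm)) := by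
  rw [Bool.eq_iff_iff, beq_iff_eq, decide_eq_true_iff,
    PySem.Dict.get?_eq_some_iff_mem_items _ _ _ (by decide), pv_atp_items,
    show PySem.Set.ofList (["email", "e-mail", "mail"].map pvNorm) = ["email", "mail"] from by decide]
  simp

theorem pv_alias_firstname (h : String) :
    (pvAliasToProp.get? h == some "firstname")
      = decide (h ∈ PySem.Set.ofList (["first name", "firstname", "first_name", "given name"].map pvNorm)) := by
  rw [Bool.eq_iff_iff, beq_iff_eq, decide_eq_true_iff,
    PySem.Dict.get?_eq_some_iff_mem_items _ _ _ (by decide), pv_atp_items,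
    show PySem.Set.ofList (["first name", "firstname", "first_name", "given name"].map pvNorm)
      = ["firstname", "givenname"] from by decide]
  simp

theorem pv_alias_lastname (h : String) :
    (pvAliasToProp.get? h == some "lastname")
      = decide (h ∈ PySem.Set.ofList (["last name", "lastname", "last_name", "surname"].map pvNorm)) := by
  rw [Bool.eq_iff_iff, beq_iff_eq, decide_eq_true_iff,
    PySem.Dict.get?_eq_some_iff_mem_items _ _ _ (by decide), pv_atp_items,
    show PySem.Set.ofList (["last name", "lastname", "last_name", "surname"].map pvNorm)
      = ["lastname", "surname"] from by decide]
  simp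

theorem pv_alias_phone (h : String) :
    (pvAliasToProp.get? h == some "phone")
      = decide (h ∈ PySem.Set.ofList (["phone", "phone number", "mobile", "mobile phone"].map pvNorm)) := by
  rw [Bool.eq_iff_iff, beq_iff_eq, decide_eq_true_iff,
    PySem.Dict.get?_eq_some_iff_mem_items _ _ _ (by decide), pv_atp_items,
    show PySem.Set.ofList (["phone", "phone number", "mobile", "mobile phone"].map pvNorm)
      = ["phone", "phonenumber", "mobile", "mobilephone"] from by decide]
  simp

theorem pv_alias_company (h : String) :
    (pvAliasToProp.get? h == some "company")
      = decide (h ∈ PySem.Set.ofList (["company", "account", "organisation", "organization"].map pvNorm)) := by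
  rw [Bool.eq_iff_iff, beq_iff_eq, decide_eq_true_iff,
    PySem.Dict.get?_eq_some_iff_mem_items _ _ _ (by decide), pv_atp_items,
    show PySem.Set.ofList (["company", "account", "organisation", "organization"].map pvNorm)
      = ["company", "account", "organisation", "organization"] from by decide]
  simp

-- any value produced by the reverse index is a key of the initial contact dict
theorem pv_alias_into_contact0 (h q : String) (hq : pvAliasToProp.get? h = some q) :
    pvContact0.contains q = true := by
  have hm := (PySem.Dict.get?_eq_some_iff_mem_items pvAliasToProp h q (by decide)).mp hq
  rw [pv_atp_items] at hm
  simp only [List.mem_cons, List.not_mem_nil, or_false, Prod.mk.injEq] at hm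
  rcases hm with ⟨_, hv⟩|⟨_, hv⟩|⟨_, hv⟩|⟨_, hv⟩|⟨_, hv⟩|⟨_, hv⟩|⟨_, hv⟩|⟨_, hv⟩|⟨_, hv⟩|⟨_, hv⟩|⟨_, hv⟩|⟨_, hv⟩|⟨_, hv⟩|⟨_, hv⟩ <;>
    subst hv <;> decide

theorem pv_contact0_getD (q : String) : pvContact0.getD q "" = "" := by
  rw [PySem.Dict.getD_eq_get?_getD]
  rcases hg : pvContact0.get? q with _ | v
  · rfl
  · have hm := (PySem.Dict.get?_eq_some_iff_mem_items pvContact0 q v (by decide)).mp hg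
    rw [show pvContact0.items = [("email", ""), ("firstname", ""), ("lastname", ""), ("phone", ""), ("company", "")] from by decide] at hm
    simp only [List.mem_cons, List.not_mem_nil, or_false, Prod.mk.injEq] at hm
    rcases hm with ⟨_, hv⟩|⟨_, hv⟩|⟨_, hv⟩|⟨_, hv⟩|⟨_, hv⟩ <;> subst hv <;> rfl

-- value of A's inner scan at any key
theorem pv_scanA_getD (vals : List String) (prop : String) (alS : PySem.Set String) (k : String) :
    ∀ (E : List (Int × String)) (c : PySem.Dict String String),
      (pvScanA vals prop alS c E).getD k "" =
        if k = prop then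
          (match E.find? (fun e => decide (e.2 ∈ alS)) with
           | some (i, _) => if i < (vals.length : Int) then PySem.List.pyGetD vals i "" else c.getD prop ""
           | none => c.getD prop "")
        else c.getD k "" := by
  intro E
  induction E with
  | nil =>
    intro c
    simp only [pvScanA, List.find?_nil]
    by_cases hk : k = prop <;> simp [hk]
  | cons e rest ih =>
    intro c
    obtain ⟨i, h⟩ := e
    simp only [pvScanA, List.find?_cons]
    by_cases hm : h ∈ alS
    · simp only [hm, decide_true, if_true]
      by_cases hk : k = prop
      · subst hk
        by_cases hi : i < (vals.length : Int) <;>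
          simp [hi, PySem.Dict.getD_insert_self]
      · by_cases hi : i < (vals.length : Int) <;>
          simp [hi, hk, PySem.Dict.getD_insert_of_ne _ _ _ hk]
    · simp only [hm, decide_false, if_false]
      rw [ih c]

-- A's inner scan does not change the key list (the inserted key is already present)
theorem pv_scanA_keys (vals : List String) (prop : String) (alS : PySem.Set String) :
    ∀ (E : List (Int × String)) (c : PySem.Dict String String), c.contains prop = true →
      (pvScanA vals prop alS c E).keys = c.keys := by
  intro E
  induction E with
  | nil => intro c _; rfl
  | cons e rest ih =>
    intro c hc
    obtain ⟨i, h⟩ := e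
    simp only [pvScanA]
    by_cases hm : h ∈ alS
    · simp only [hm, if_true]
      by_cases hi : i < (vals.length : Int) <;>
        simp [hi, PySem.Dict.keys_insert_of_contains _ _ hc]
    · simp only [hm, if_false]
      exact ih c hc

-- nor the contains relation
theorem pv_scanA_contains (vals : List String) (prop : String) (alS : PySem.Set String) :
    ∀ (E : List (Int × String)) (c : PySem.Dict String String) (x : String), c.contains prop = true →
      (pvScanA vals prop alS c E).contains x = c.contains x := by
  intro E
  induction E with
  | nil => intro c x _; rfl
  | cons e rest ih =>
    intro c x hc
    obtain ⟨i, h⟩ := e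
    simp only [pvScanA]
    by_cases hm : h ∈ alS
    · simp only [hm, if_true]
      by_cases hi : i < (vals.length : Int)
      · simp only [hi, if_true, PySem.Dict.contains_insert]
        by_cases hx : x = prop <;> simp [hx, hc]
      · simp [hi]
    · simp only [hm, if_false]
      exact ih c x hc

-- value of B's single pass at any key
theorem pv_loopB_getD (vals : List String) (p : String) :
    ∀ (E : List (Int × String)) (S : PySem.Set String) (c : PySem.Dict String String),
      (∀ q, q ∉ S → c.getD q "" = "") →
      (pvLoopB vals E S c).getD p "" =
        if p ∈ S then c.getD p "" else
          (match E.find? (fun e => pvAliasToProp.get? e.2 == some p) with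
           | some (i, _) => if i < (vals.length : Int) then PySem.List.pyGetD vals i "" else ""
           | none => c.getD p "") := by
  intro E
  induction E with
  | nil =>
    intro S c _
    simp only [pvLoopB, List.find?_nil]
    by_cases hp : p ∈ S <;> simp [hp]
  | cons e rest ih =>
    intro S c hS
    obtain ⟨i, h⟩ := e
    simp only [pvLoopB, List.find?_cons]
    cases hq : pvAliasToProp.get? h with
    | none =>
      rw [ih S c hS]
      simp [hq]
    | some q =>
      by_cases hqs : q ∈ S
      · simp only [hqs, if_true]
        rw [ih S c hS]
        by_cases hp : p ∈ S
        · simp [hp]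
        · have hne : q ≠ p := fun hh => hp (hh ▸ hqs)
          have hb : (q == p) = false := by simp [hne]
          simp [hp, hq, hb]
      · simp only [hqs, if_false]
        have hS' : ∀ r, r ∉ PySem.Set.add S q →
            (if i < (vals.length : Int) then c.insert q (PySem.List.pyGetD vals i "") else c).getD r "" = "" := by
          intro r hr
          rw [PySem.Set.mem_add] at hr
          push_neg at hr
          obtain hr := And.intro hr.2 hr.1
          by_cases hi : i < (vals.length : Int)
          · simp only [hi, if_true]
            rw [PySem.Dict.getD_insert_of_ne _ _ _ hr.1]
            exact hS r hr.2
          · simp only [hi, if_false]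
            exact hS r hr.2
        rw [ih _ _ hS']
        by_cases hpq : p = q
        · subst hpq
          have hmem : p ∈ PySem.Set.add S p := by rw [PySem.Set.mem_add]; right; rfl
          simp only [hmem, if_true, hqs, if_false, hq, beq_self_eq_true, if_true]
          by_cases hi : i < (vals.length : Int)
          · simp [hi, PySem.Dict.getD_insert_self]
          · simp [hi, hS p hqs]
        · have hmem : (p ∈ PySem.Set.add S q) ↔ p ∈ S := by
            rw [PySem.Set.mem_add]
            exact ⟨fun hh => hh.elim id (fun hh => absurd hh hpq), Or.inl⟩
          have hbeq : (some q == some p) = false := by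
            simp [Ne.symm hpq]
          by_cases hi : i < (vals.length : Int) <;>
            by_cases hp : p ∈ S <;>
              simp [hi, hp, hmem, hbeq, PySem.Dict.getD_insert_of_ne _ _ _ hpq]

-- B's single pass does not change the key list
theorem pv_loopB_keys (vals : List String) :
    ∀ (E : List (Int × String)) (S : PySem.Set String) (c : PySem.Dict String String),
      (∀ h q, pvAliasToProp.get? h = some q → c.contains q = true) →
      (pvLoopB vals E S c).keys = c.keys := by
  intro E
  induction E with
  | nil => intro S c _; rfl
  | cons e rest ih =>
    intro S c hc
    obtain ⟨i, h⟩ := e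
    simp only [pvLoopB]
    cases hq : pvAliasToProp.get? h with
    | none => exact ih S c hc
    | some q =>
      dsimp only
      by_cases hqs : q ∈ S
      · rw [if_pos hqs]; exact ih S c hc
      · rw [if_neg hqs]
        by_cases hi : i < (vals.length : Int)
        · simp only [hi, if_true]
          rw [ih _ _ ?_, PySem.Dict.keys_insert_of_contains _ _ (hc h q hq)]
          intro h' q' hq'
          rw [PySem.Dict.contains_insert]
          simp [hc h' q' hq']
        · simp only [hi, if_false]
          exact ih _ c hc

-- first matching header value for one alias set (shared description of both heuristic loops)
def pvSpecVal (vals : List String) (E : List (Int × String)) (al : PySem.Set String) : String :=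
  match E.find? (fun e => decide (e.2 ∈ al)) with
  | some (i, _) => if i < (vals.length : Int) then PySem.List.pyGetD vals i "" else ""
  | none => ""

theorem pv_scanA_getD' (vals : List String) (prop : String) (alS : PySem.Set String)
    (E : List (Int × String)) (c : PySem.Dict String String) (k : String)
    (h0 : c.getD prop "" = "") :
    (pvScanA vals prop alS c E).getD k "" =
      if k = prop then pvSpecVal vals E alS else c.getD k "" := by
  rw [pv_scanA_getD]
  by_cases hk : k = prop
  · simp only [hk, if_true, h0, pvSpecVal]
  · simp [hk]

theorem pv_loopB_getD0 (vals : List String) (E : List (Int × String)) (p : String) :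
    (pvLoopB vals E [] pvContact0).getD p "" =
      match E.find? (fun e => pvAliasToProp.get? e.2 == some p) with
      | some (i, _) => if i < (vals.length : Int) then PySem.List.pyGetD vals i "" else ""
      | none => "" := by
  rw [pv_loopB_getD vals p E [] pvContact0 (fun q _ => pv_contact0_getD q),
    if_neg (List.not_mem_nil)]
  simp only [pv_contact0_getD]

theorem pv_loopB_val (vals : List String) (E : List (Int × String)) (p : String)
    (al : PySem.Set String)
    (hal : ∀ h, (pvAliasToProp.get? h == some p) = decide (h ∈ al)) :
    (pvLoopB vals E [] pvContact0).getD p "" = pvSpecVal vals E al := by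
  rw [pv_loopB_getD0, pv_find?_eqv E _ _ (fun e _ => hal e.2), pvSpecVal]

-- the two heuristic branches build the same dictionary
theorem pv_heur_eq (vals : List String) (hnorm : List String) :
    pvHeurA vals hnorm = pvLoopB vals (PySem.List.enumerate hnorm 0) [] pvContact0 := by
  generalize hEe : PySem.List.enumerate hnorm 0 = E
  have hfold : pvHeurA vals hnorm = (pvScanA vals "company" (PySem.Set.ofList (["company", "account", "organisation", "organization"].map pvNorm)) (pvScanA vals "phone" (PySem.Set.ofList (["phone", "phone number", "mobile", "mobile phone"].map pvNorm)) (pvScanA vals "lastname" (PySem.Set.ofList (["last name", "lastname", "last_name", "surname"].map pvNorm)) (pvScanA vals "firstname" (PySem.Set.ofList (["first name", "firstname", "first_name", "given name"].map pvNorm)) (pvScanA vals "email" (PySem.Set.ofList (["email", "e-mail", "mail"].map pvNorm)) pvContact0 E) E) E) E) E) := by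
    rw [← hEe]
    simp only [pvHeurA, pvHeaderAliases, List.foldl_cons, List.foldl_nil]
  have hcont1 : ∀ x, ((pvScanA vals "email" (PySem.Set.ofList (["email", "e-mail", "mail"].map pvNorm)) pvContact0 E)).contains x = pvContact0.contains x :=
    fun x => pv_scanA_contains vals "email" (PySem.Set.ofList (["email", "e-mail", "mail"].map pvNorm)) E pvContact0 x (by decide)
  have hcont2 : ∀ x, ((pvScanA vals "firstname" (PySem.Set.ofList (["first name", "firstname", "first_name", "given name"].map pvNorm)) (pvScanA vals "email" (PySem.Set.ofList (["email", "e-mail", "mail"].map pvNorm)) pvContact0 E) E)).contains x = pvContact0.contains x :=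
    fun x => (pv_scanA_contains vals "firstname" (PySem.Set.ofList (["first name", "firstname", "first_name", "given name"].map pvNorm)) E (pvScanA vals "email" (PySem.Set.ofList (["email", "e-mail", "mail"].map pvNorm)) pvContact0 E) x
      ((hcont1 "firstname").trans (by decide))).trans (hcont1 x)
  have hcont3 : ∀ x, ((pvScanA vals "lastname" (PySem.Set.ofList (["last name", "lastname", "last_name", "surname"].map pvNorm)) (pvScanA vals "firstname" (PySem.Set.ofList (["first name", "firstname", "first_name", "given name"].map pvNorm)) (pvScanA vals "email" (PySem.Set.ofList (["email", "e-mail", "mail"].map pvNorm)) pvContact0 E) E) E)).contains x = pvContact0.contains x :=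
    fun x => (pv_scanA_contains vals "lastname" (PySem.Set.ofList (["last name", "lastname", "last_name", "surname"].map pvNorm)) E (pvScanA vals "firstname" (PySem.Set.ofList (["first name", "firstname", "first_name", "given name"].map pvNorm)) (pvScanA vals "email" (PySem.Set.ofList (["email", "e-mail", "mail"].map pvNorm)) pvContact0 E) E) x
      ((hcont2 "lastname").trans (by decide))).trans (hcont2 x)
  have hcont4 : ∀ x, ((pvScanA vals "phone" (PySem.Set.ofList (["phone", "phone number", "mobile", "mobile phone"].map pvNorm)) (pvScanA vals "lastname" (PySem.Set.ofList (["last name", "lastname", "last_name", "surname"].map pvNorm)) (pvScanA vals "firstname" (PySem.Set.ofList (["first name", "firstname", "first_name", "given name"].map pvNorm)) (pvScanA vals "email" (PySem.Set.ofList (["email", "e-mail", "mail"].map pvNorm)) pvContact0 E) E) E) E)).contains x = pvContact0.contains x :=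
    fun x => (pv_scanA_contains vals "phone" (PySem.Set.ofList (["phone", "phone number", "mobile", "mobile phone"].map pvNorm)) E (pvScanA vals "lastname" (PySem.Set.ofList (["last name", "lastname", "last_name", "surname"].map pvNorm)) (pvScanA vals "firstname" (PySem.Set.ofList (["first name", "firstname", "first_name", "given name"].map pvNorm)) (pvScanA vals "email" (PySem.Set.ofList (["email", "e-mail", "mail"].map pvNorm)) pvContact0 E) E) E) x
      ((hcont3 "phone").trans (by decide))).trans (hcont3 x)
  have hcont5 : ∀ x, ((pvScanA vals "company" (PySem.Set.ofList (["company", "account", "organisation", "organization"].map pvNorm)) (pvScanA vals "phone" (PySem.Set.ofList (["phone", "phone number", "mobile", "mobile phone"].map pvNorm)) (pvScanA vals "lastname" (PySem.Set.ofList (["last name", "lastname", "last_name", "surname"].map pvNorm)) (pvScanA vals "firstname" (PySem.Set.ofList (["first name", "firstname", "first_name", "given name"].map pvNorm)) (pvScanA vals "email" (PySem.Set.ofList (["email", "e-mail", "mail"].map pvNorm)) pvContact0 E) E) E) E) E)).contains x = pvContact0.contains x :=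
    fun x => (pv_scanA_contains vals "company" (PySem.Set.ofList (["company", "account", "organisation", "organization"].map pvNorm)) E (pvScanA vals "phone" (PySem.Set.ofList (["phone", "phone number", "mobile", "mobile phone"].map pvNorm)) (pvScanA vals "lastname" (PySem.Set.ofList (["last name", "lastname", "last_name", "surname"].map pvNorm)) (pvScanA vals "firstname" (PySem.Set.ofList (["first name", "firstname", "first_name", "given name"].map pvNorm)) (pvScanA vals "email" (PySem.Set.ofList (["email", "e-mail", "mail"].map pvNorm)) pvContact0 E) E) E) E) x
      ((hcont4 "company").trans (by decide))).trans (hcont4 x)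
  have hk1 : ((pvScanA vals "email" (PySem.Set.ofList (["email", "e-mail", "mail"].map pvNorm)) pvContact0 E)).keys = pvContact0.keys :=
    pv_scanA_keys vals "email" (PySem.Set.ofList (["email", "e-mail", "mail"].map pvNorm)) E pvContact0 (by decide)
  have hk2 : ((pvScanA vals "firstname" (PySem.Set.ofList (["first name", "firstname", "first_name", "given name"].map pvNorm)) (pvScanA vals "email" (PySem.Set.ofList (["email", "e-mail", "mail"].map pvNorm)) pvContact0 E) E)).keys = pvContact0.keys :=
    (pv_scanA_keys vals "firstname" (PySem.Set.ofList (["first name", "firstname", "first_name", "given name"].map pvNorm)) E (pvScanA vals "email" (PySem.Set.ofList (["email", "e-mail", "mail"].map pvNorm)) pvContact0 E)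
      ((hcont1 "firstname").trans (by decide))).trans hk1
  have hk3 : ((pvScanA vals "lastname" (PySem.Set.ofList (["last name", "lastname", "last_name", "surname"].map pvNorm)) (pvScanA vals "firstname" (PySem.Set.ofList (["first name", "firstname", "first_name", "given name"].map pvNorm)) (pvScanA vals "email" (PySem.Set.ofList (["email", "e-mail", "mail"].map pvNorm)) pvContact0 E) E) E)).keys = pvContact0.keys :=
    (pv_scanA_keys vals "lastname" (PySem.Set.ofList (["last name", "lastname", "last_name", "surname"].map pvNorm)) E (pvScanA vals "firstname" (PySem.Set.ofList (["first name", "firstname", "first_name", "given name"].map pvNorm)) (pvScanA vals "email" (PySem.Set.ofList (["email", "e-mail", "mail"].map pvNorm)) pvContact0 E) E)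
      ((hcont2 "lastname").trans (by decide))).trans hk2
  have hk4 : ((pvScanA vals "phone" (PySem.Set.ofList (["phone", "phone number", "mobile", "mobile phone"].map pvNorm)) (pvScanA vals "lastname" (PySem.Set.ofList (["last name", "lastname", "last_name", "surname"].map pvNorm)) (pvScanA vals "firstname" (PySem.Set.ofList (["first name", "firstname", "first_name", "given name"].map pvNorm)) (pvScanA vals "email" (PySem.Set.ofList (["email", "e-mail", "mail"].map pvNorm)) pvContact0 E) E) E) E)).keys = pvContact0.keys :=
    (pv_scanA_keys vals "phone" (PySem.Set.ofList (["phone", "phone number", "mobile", "mobile phone"].map pvNorm)) E (pvScanA vals "lastname" (PySem.Set.ofList (["last name", "lastname", "last_name", "surname"].map pvNorm)) (pvScanA vals "firstname" (PySem.Set.ofList (["first name", "firstname", "first_name", "given name"].map pvNorm)) (pvScanA vals "email" (PySem.Set.ofList (["email", "e-mail", "mail"].map pvNorm)) pvContact0 E) E) E)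
      ((hcont3 "phone").trans (by decide))).trans hk3
  have hk5 : ((pvScanA vals "company" (PySem.Set.ofList (["company", "account", "organisation", "organization"].map pvNorm)) (pvScanA vals "phone" (PySem.Set.ofList (["phone", "phone number", "mobile", "mobile phone"].map pvNorm)) (pvScanA vals "lastname" (PySem.Set.ofList (["last name", "lastname", "last_name", "surname"].map pvNorm)) (pvScanA vals "firstname" (PySem.Set.ofList (["first name", "firstname", "first_name", "given name"].map pvNorm)) (pvScanA vals "email" (PySem.Set.ofList (["email", "e-mail", "mail"].map pvNorm)) pvContact0 E) E) E) E) E)).keys = pvContact0.keys :=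
    (pv_scanA_keys vals "company" (PySem.Set.ofList (["company", "account", "organisation", "organization"].map pvNorm)) E (pvScanA vals "phone" (PySem.Set.ofList (["phone", "phone number", "mobile", "mobile phone"].map pvNorm)) (pvScanA vals "lastname" (PySem.Set.ofList (["last name", "lastname", "last_name", "surname"].map pvNorm)) (pvScanA vals "firstname" (PySem.Set.ofList (["first name", "firstname", "first_name", "given name"].map pvNorm)) (pvScanA vals "email" (PySem.Set.ofList (["email", "e-mail", "mail"].map pvNorm)) pvContact0 E) E) E) E)
      ((hcont4 "company").trans (by decide))).trans hk4
  have hg1 : ∀ k, ((pvScanA vals "email" (PySem.Set.ofList (["email", "e-mail", "mail"].map pvNorm)) pvContact0 E)).getD k "" =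
      if k = "email" then pvSpecVal vals E (PySem.Set.ofList (["email", "e-mail", "mail"].map pvNorm)) else pvContact0.getD k "" :=
    fun k => pv_scanA_getD' vals "email" (PySem.Set.ofList (["email", "e-mail", "mail"].map pvNorm)) E pvContact0 k (pv_contact0_getD _)
  have hg2 : ∀ k, ((pvScanA vals "firstname" (PySem.Set.ofList (["first name", "firstname", "first_name", "given name"].map pvNorm)) (pvScanA vals "email" (PySem.Set.ofList (["email", "e-mail", "mail"].map pvNorm)) pvContact0 E) E)).getD k "" =
      if k = "firstname" then pvSpecVal vals E (PySem.Set.ofList (["first name", "firstname", "first_name", "given name"].map pvNorm)) else ((pvScanA vals "email" (PySem.Set.ofList (["email", "e-mail", "mail"].map pvNorm)) pvContact0 E)).getD k "" :=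
    fun k => pv_scanA_getD' vals "firstname" (PySem.Set.ofList (["first name", "firstname", "first_name", "given name"].map pvNorm)) E (pvScanA vals "email" (PySem.Set.ofList (["email", "e-mail", "mail"].map pvNorm)) pvContact0 E) k (by rw [hg1, if_neg (by decide), pv_contact0_getD])
  have hg3 : ∀ k, ((pvScanA vals "lastname" (PySem.Set.ofList (["last name", "lastname", "last_name", "surname"].map pvNorm)) (pvScanA vals "firstname" (PySem.Set.ofList (["first name", "firstname", "first_name", "given name"].map pvNorm)) (pvScanA vals "email" (PySem.Set.ofList (["email", "e-mail", "mail"].map pvNorm)) pvContact0 E) E) E)).getD k "" =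
      if k = "lastname" then pvSpecVal vals E (PySem.Set.ofList (["last name", "lastname", "last_name", "surname"].map pvNorm)) else ((pvScanA vals "firstname" (PySem.Set.ofList (["first name", "firstname", "first_name", "given name"].map pvNorm)) (pvScanA vals "email" (PySem.Set.ofList (["email", "e-mail", "mail"].map pvNorm)) pvContact0 E) E)).getD k "" :=
    fun k => pv_scanA_getD' vals "lastname" (PySem.Set.ofList (["last name", "lastname", "last_name", "surname"].map pvNorm)) E (pvScanA vals "firstname" (PySem.Set.ofList (["first name", "firstname", "first_name", "given name"].map pvNorm)) (pvScanA vals "email" (PySem.Set.ofList (["email", "e-mail", "mail"].map pvNorm)) pvContact0 E) E) k (by rw [hg2, if_neg (by decide), hg1, if_neg (by decide), pv_contact0_getD])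
  have hg4 : ∀ k, ((pvScanA vals "phone" (PySem.Set.ofList (["phone", "phone number", "mobile", "mobile phone"].map pvNorm)) (pvScanA vals "lastname" (PySem.Set.ofList (["last name", "lastname", "last_name", "surname"].map pvNorm)) (pvScanA vals "firstname" (PySem.Set.ofList (["first name", "firstname", "first_name", "given name"].map pvNorm)) (pvScanA vals "email" (PySem.Set.ofList (["email", "e-mail", "mail"].map pvNorm)) pvContact0 E) E) E) E)).getD k "" =
      if k = "phone" then pvSpecVal vals E (PySem.Set.ofList (["phone", "phone number", "mobile", "mobile phone"].map pvNorm)) else ((pvScanA vals "lastname" (PySem.Set.ofList (["last name", "lastname", "last_name", "surname"].map pvNorm)) (pvScanA vals "firstname" (PySem.Set.ofList (["first name", "firstname", "first_name", "given name"].map pvNorm)) (pvScanA vals "email" (PySem.Set.ofList (["email", "e-mail", "mail"].map pvNorm)) pvContact0 E) E) E)).getD k "" :=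
    fun k => pv_scanA_getD' vals "phone" (PySem.Set.ofList (["phone", "phone number", "mobile", "mobile phone"].map pvNorm)) E (pvScanA vals "lastname" (PySem.Set.ofList (["last name", "lastname", "last_name", "surname"].map pvNorm)) (pvScanA vals "firstname" (PySem.Set.ofList (["first name", "firstname", "first_name", "given name"].map pvNorm)) (pvScanA vals "email" (PySem.Set.ofList (["email", "e-mail", "mail"].map pvNorm)) pvContact0 E) E) E) k (by rw [hg3, if_neg (by decide), hg2, if_neg (by decide), hg1, if_neg (by decide), pv_contact0_getD])
  have hg5 : ∀ k, ((pvScanA vals "company" (PySem.Set.ofList (["company", "account", "organisation", "organization"].map pvNorm)) (pvScanA vals "phone" (PySem.Set.ofList (["phone", "phone number", "mobile", "mobile phone"].map pvNorm)) (pvScanA vals "lastname" (PySem.Set.ofList (["last name", "lastname", "last_name", "surname"].map pvNorm)) (pvScanA vals "firstname" (PySem.Set.ofList (["first name", "firstname", "first_name", "given name"].map pvNorm)) (pvScanA vals "email" (PySem.Set.ofList (["email", "e-mail", "mail"].map pvNorm)) pvContact0 E) E) E) E) E)).getD k "" =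
      if k = "company" then pvSpecVal vals E (PySem.Set.ofList (["company", "account", "organisation", "organization"].map pvNorm)) else ((pvScanA vals "phone" (PySem.Set.ofList (["phone", "phone number", "mobile", "mobile phone"].map pvNorm)) (pvScanA vals "lastname" (PySem.Set.ofList (["last name", "lastname", "last_name", "surname"].map pvNorm)) (pvScanA vals "firstname" (PySem.Set.ofList (["first name", "firstname", "first_name", "given name"].map pvNorm)) (pvScanA vals "email" (PySem.Set.ofList (["email", "e-mail", "mail"].map pvNorm)) pvContact0 E) E) E) E)).getD k "" :=
    fun k => pv_scanA_getD' vals "company" (PySem.Set.ofList (["company", "account", "organisation", "organization"].map pvNorm)) E (pvScanA vals "phone" (PySem.Set.ofList (["phone", "phone number", "mobile", "mobile phone"].map pvNorm)) (pvScanA vals "lastname" (PySem.Set.ofList (["last name", "lastname", "last_name", "surname"].map pvNorm)) (pvScanA vals "firstname" (PySem.Set.ofList (["first name", "firstname", "first_name", "given name"].map pvNorm)) (pvScanA vals "email" (PySem.Set.ofList (["email", "e-mail", "mail"].map pvNorm)) pvContact0 E) E) E) E) k (by rw [hg4, if_neg (by decide), hg3, if_neg (by decide), hg2, if_neg (by decide),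 hg1, if_neg (by decide), pv_contact0_getD])
  have vA_email : ((pvScanA vals "company" (PySem.Set.ofList (["company", "account", "organisation", "organization"].map pvNorm)) (pvScanA vals "phone" (PySem.Set.ofList (["phone", "phone number", "mobile", "mobile phone"].map pvNorm)) (pvScanA vals "lastname" (PySem.Set.ofList (["last name", "lastname", "last_name", "surname"].map pvNorm)) (pvScanA vals "firstname" (PySem.Set.ofList (["first name", "firstname", "first_name", "given name"].map pvNorm)) (pvScanA vals "email" (PySem.Set.ofList (["email", "e-mail", "mail"].map pvNorm)) pvContact0 E) E) E) E) E)).getD "email" "" = pvSpecVal vals E (PySem.Set.ofList (["email", "e-mail", "mail"].map pvNorm)) := by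
    rw [hg5, if_neg (by decide), hg4, if_neg (by decide), hg3, if_neg (by decide), hg2, if_neg (by decide), hg1, if_pos rfl]
  have vA_firstname : ((pvScanA vals "company" (PySem.Set.ofList (["company", "account", "organisation", "organization"].map pvNorm)) (pvScanA vals "phone" (PySem.Set.ofList (["phone", "phone number", "mobile", "mobile phone"].map pvNorm)) (pvScanA vals "lastname" (PySem.Set.ofList (["last name", "lastname", "last_name", "surname"].map pvNorm)) (pvScanA vals "firstname" (PySem.Set.ofList (["first name", "firstname", "first_name", "given name"].map pvNorm)) (pvScanA vals "email" (PySem.Set.ofList (["email", "e-mail", "mail"].map pvNorm)) pvContact0 E) E) E) E) E)).getD "firstname" "" = pvSpecVal vals E (PySem.Set.ofList (["first name", "firstname", "first_name", "given name"].map pvNorm)) := by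
    rw [hg5, if_neg (by decide), hg4, if_neg (by decide), hg3, if_neg (by decide), hg2, if_pos rfl]
  have vA_lastname : ((pvScanA vals "company" (PySem.Set.ofList (["company", "account", "organisation", "organization"].map pvNorm)) (pvScanA vals "phone" (PySem.Set.ofList (["phone", "phone number", "mobile", "mobile phone"].map pvNorm)) (pvScanA vals "lastname" (PySem.Set.ofList (["last name", "lastname", "last_name", "surname"].map pvNorm)) (pvScanA vals "firstname" (PySem.Set.ofList (["first name", "firstname", "first_name", "given name"].map pvNorm)) (pvScanA vals "email" (PySem.Set.ofList (["email", "e-mail", "mail"].map pvNorm)) pvContact0 E) E) E) E) E)).getD "lastname" "" = pvSpecVal vals E (PySem.Set.ofList (["last name", "lastname", "last_name", "surname"].map pvNorm)) := by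
    rw [hg5, if_neg (by decide), hg4, if_neg (by decide), hg3, if_pos rfl]
  have vA_phone : ((pvScanA vals "company" (PySem.Set.ofList (["company", "account", "organisation", "organization"].map pvNorm)) (pvScanA vals "phone" (PySem.Set.ofList (["phone", "phone number", "mobile", "mobile phone"].map pvNorm)) (pvScanA vals "lastname" (PySem.Set.ofList (["last name", "lastname", "last_name", "surname"].map pvNorm)) (pvScanA vals "firstname" (PySem.Set.ofList (["first name", "firstname", "first_name", "given name"].map pvNorm)) (pvScanA vals "email" (PySem.Set.ofList (["email", "e-mail", "mail"].map pvNorm)) pvContact0 E) E) E) E) E)).getD "phone" "" = pvSpecVal vals E (PySem.Set.ofList (["phone", "phone number", "mobile", "mobile phone"].map pvNorm)) := by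
    rw [hg5, if_neg (by decide), hg4, if_pos rfl]
  have vA_company : ((pvScanA vals "company" (PySem.Set.ofList (["company", "account", "organisation", "organization"].map pvNorm)) (pvScanA vals "phone" (PySem.Set.ofList (["phone", "phone number", "mobile", "mobile phone"].map pvNorm)) (pvScanA vals "lastname" (PySem.Set.ofList (["last name", "lastname", "last_name", "surname"].map pvNorm)) (pvScanA vals "firstname" (PySem.Set.ofList (["first name", "firstname", "first_name", "given name"].map pvNorm)) (pvScanA vals "email" (PySem.Set.ofList (["email", "e-mail", "mail"].map pvNorm)) pvContact0 E) E) E) E) E)).getD "company" "" = pvSpecVal vals E (PySem.Set.ofList (["company", "account", "organisation", "organization"].map pvNorm)) := by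
    rw [hg5, if_pos rfl]
  have vB_email : (pvLoopB vals E [] pvContact0).getD "email" "" = pvSpecVal vals E (PySem.Set.ofList (["email", "e-mail", "mail"].map pvNorm)) :=
    pv_loopB_val vals E "email" (PySem.Set.ofList (["email", "e-mail", "mail"].map pvNorm)) pv_alias_email
  have vB_firstname : (pvLoopB vals E [] pvContact0).getD "firstname" "" = pvSpecVal vals E (PySem.Set.ofList (["first name", "firstname", "first_name", "given name"].map pvNorm)) :=
    pv_loopB_val vals E "firstname" (PySem.Set.ofList (["first name", "firstname", "first_name", "given name"].map pvNorm)) pv_alias_firstname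
  have vB_lastname : (pvLoopB vals E [] pvContact0).getD "lastname" "" = pvSpecVal vals E (PySem.Set.ofList (["last name", "lastname", "last_name", "surname"].map pvNorm)) :=
    pv_loopB_val vals E "lastname" (PySem.Set.ofList (["last name", "lastname", "last_name", "surname"].map pvNorm)) pv_alias_lastname
  have vB_phone : (pvLoopB vals E [] pvContact0).getD "phone" "" = pvSpecVal vals E (PySem.Set.ofList (["phone", "phone number", "mobile", "mobile phone"].map pvNorm)) :=
    pv_loopB_val vals E "phone" (PySem.Set.ofList (["phone", "phone number", "mobile", "mobile phone"].map pvNorm)) pv_alias_phone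
  have vB_company : (pvLoopB vals E [] pvContact0).getD "company" "" = pvSpecVal vals E (PySem.Set.ofList (["company", "account", "organisation", "organization"].map pvNorm)) :=
    pv_loopB_val vals E "company" (PySem.Set.ofList (["company", "account", "organisation", "organization"].map pvNorm)) pv_alias_company
  have hkeysA : (pvHeurA vals hnorm).keys = pvContact0.keys := by rw [hfold]; exact hk5
  have hkeysB : (pvLoopB vals E [] pvContact0).keys = pvContact0.keys :=
    pv_loopB_keys vals E [] pvContact0 pv_alias_into_contact0
  apply PySem.Dict.ext
  rw [PySem.Dict.items_eq_map_keys _ (by rw [hkeysA]; decide) "",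
    PySem.Dict.items_eq_map_keys _ (by rw [hkeysB]; decide) "",
    hkeysA, hkeysB,
    show pvContact0.keys = ["email", "firstname", "lastname", "phone", "company"] from by decide]
  simp only [List.map_cons, List.map_nil]
  rw [hfold, vA_email, vA_firstname, vA_lastname, vA_phone, vA_company,
    vB_email, vB_firstname, vB_lastname, vB_phone, vB_company]

-- first-index dictionary lookup = list.index
theorem pv_hidx_gen (l : List String) :
    ∀ (n : Int) (d : PySem.Dict String Int) (w : String),
      ((PySem.List.enumerate l n).foldl (fun d p => d.setdefault p.2 p.1) d).get? w
      = if d.contains w then d.get? w else (PySem.List.index? l w).map (fun j => (j : Int) + n) := by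
  induction l with
  | nil =>
    intro n d w
    simp only [PySem.List.enumerate_nil, List.foldl_nil]
    by_cases hc : d.contains w = true
    · simp [hc]
    · rw [if_neg (by simp [hc]),
        (PySem.Dict.get?_eq_none_iff_contains d w).mpr (by simpa using hc)]
      simp [PySem.List.index?_eq_idxOf?]
  | cons x xs ih =>
    intro n d w
    rw [PySem.List.enumerate_cons]
    simp only [List.foldl_cons]
    rw [ih (n + 1) (d.setdefault x n) w]
    by_cases hc : d.contains w = true
    · have hc' : (d.setdefault x n).contains w = true := by
        rw [PySem.Dict.contains_setdefault]; simp [hc]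
      rw [if_pos hc', if_pos hc]
      by_cases hwx : w = x
      · subst hwx
        obtain ⟨v, hv⟩ : ∃ v, d.get? w = some v := by
          have h2 := PySem.Dict.contains_eq_isSome_get? d w
          rw [hc] at h2
          exact Option.isSome_iff_exists.mp h2.symm
        rw [PySem.Dict.get?_setdefault_self, hv]
        rfl
      · exact PySem.Dict.get?_setdefault_of_ne _ _ hwx
    · by_cases hwx : w = x
      · subst hwx
        have hc' : (d.setdefault w n).contains w = true := by
          rw [PySem.Dict.contains_setdefault]; simp
        rw [if_pos hc', if_neg (by simp [hc]), PySem.List.index?_cons_self,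
          PySem.Dict.setdefault_of_not_contains _ _ (by simpa using hc),
          PySem.Dict.get?_insert_self]
        simp
      · have hc' : (d.setdefault x n).contains w = false := by
          rw [PySem.Dict.contains_setdefault]
          simp [hwx, hc]
        rw [if_neg (by simp [hc']), if_neg (by simp [hc]),
          PySem.List.index?_cons_of_ne _ (Ne.symm hwx)]
        cases PySem.List.index? xs w <;> simp
        ring

theorem pv_hidx_get? (hnorm : List String) (w : String) :
    ((PySem.List.enumerate hnorm 0).foldl (fun d p => d.setdefault p.2 p.1) PySem.Dict.empty).get? w
    = (PySem.List.index? hnorm w).map (fun j => (j : Int)) := by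
  rw [pv_hidx_gen]
  simp [PySem.Dict.contains_empty]

-- the two mapping branches build the same dictionary
theorem pv_map_eq (vals hnorm : List String) (m : List (String × String)) :
    ((PySem.Dict.ofList m).items.foldl
        (fun d p => if pvContact0.contains p.1 then d.insert p.1 (pvNorm p.2) else d)
        PySem.Dict.empty).items.foldl
      (fun c pw =>
        match PySem.List.index? hnorm pw.2 with
        | some idx => if idx < vals.length then c.insert pw.1 (vals.getD idx "") else c
        | none => c)
      pvContact0
    = (PySem.Dict.ofList m).items.foldl
        (fun c kv =>
          if pvContact0.contains kv.1 then
            match ((PySem.List.enumerate hnorm 0).foldl (fun d p => d.setdefault p.2 p.1) PySem.Dict.empty).get? (pvNorm kv.2) with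
            | some idx => if idx < (vals.length : Int) then c.insert kv.1 (PySem.List.pyGetD vals idx "") else c
            | none => c
          else c)
        pvContact0 := by
  have hk := PySem.Dict.nodup_keys_ofList (ν := String) m
  simp only [PySem.Dict.keys] at hk
  have hnd : (((PySem.Dict.ofList m).items.filter (fun p => pvContact0.contains p.1)).map (fun p => p.1)).Nodup :=
    (List.Sublist.map (fun (p : String × String) => p.1)
      (List.filter_sublist (l := (PySem.Dict.ofList m).items))).nodup hk
  rw [← List.foldl_filter,
    PySem.Dict.items_foldl_insert_fresh ((PySem.Dict.ofList m).items.filter (fun p => pvContact0.contains p.1)) (fun p => p.1) (fun p => pvNorm p.2) PySem.Dict.empty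
      (fun a _ => PySem.Dict.contains_empty _) hnd,
    show (PySem.Dict.empty : PySem.Dict String String).items = [] from rfl]
  rw [List.nil_append, List.foldl_map, List.foldl_filter]
  have hstep : (fun (c : PySem.Dict String String) (x : String × String) =>
      if (pvContact0.contains x.1) = true then
        (match PySem.List.index? hnorm (x.1, pvNorm x.2).2 with
          | some idx => if idx < vals.length then c.insert (x.1, pvNorm x.2).1 (vals.getD idx "") else c
          | none => c)
      else c)
      = (fun (c : PySem.Dict String String) (kv : String × String) =>
          if pvContact0.contains kv.1 then
            match ((PySem.List.enumerate hnorm 0).foldl (fun d p => d.setdefault p.2 p.1) PySem.Dict.empty).get? (pvNorm kv.2) with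
            | some idx => if idx < (vals.length : Int) then c.insert kv.1 (PySem.List.pyGetD vals idx "") else c
            | none => c
          else c) := by
    funext c p
    by_cases hP : pvContact0.contains p.1 = true
    · simp only [hP, if_true]
      rw [pv_hidx_get?]
      cases hj : PySem.List.index? hnorm (pvNorm p.2) with
      | none => rfl
      | some j => simp [Nat.cast_lt]
    · simp [hP]
  rw [hstep]

theorem map_row_to_contact_spec : Claim_equal_map_row_to_contact := by
  intro headers values mapping _
  unfold Spec_map_row_to_contact map_row_to_contact map_row_to_contact_alt
  cases mapping with
  | none => simp only []; rw [pv_heur_eq]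
  | some m =>
    by_cases hm : m.isEmpty
    · simp only [hm, if_true]; rw [pv_heur_eq]
    · simp only [hm]
      exact congrArg pvFinish (pv_map_eq _ _ m)
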